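-- pv_equiv track=rewrite | github.com/acatspirit/realtime_decoding_qldpc | src/realtime_decoding/complementary_gap.py | get_detector_inds_for_sc
-- ===== SOURCE A (Python) =====
-- def get_detector_inds_for_sc(d,rds):
--     #Get the detector indices which are L/R boundary (X)
--
--     rds_eff = rds+1
--     n_anc   = d**2-1
--
--
--     X_det_inds = []
--     Z_det_inds = []
--
--     X_det_inds_LB = []
--     X_det_inds_RB = []
--
--     X_dets_inds_LB_per_rd = []
--     X_dets_inds_RB_per_rd = []
--
--     for rd in range(rds_eff):
--
--
--         for k in range(n_anc//2):
--             X_det_inds.append(k+n_anc*rd)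
--
--         temp_X_LB = []
--         temp_X_RB = []
--         for k in range(n_anc//4): #LB
--             X_det_inds_LB.append(k+n_anc*rd)
--             temp_X_LB.append(k+n_anc*rd)
--
--         for k in range(n_anc//4,n_anc//2):
--             X_det_inds_RB.append(k+n_anc*rd)
--             temp_X_RB.append(k+n_anc*rd)
--
--
--         X_dets_inds_LB_per_rd.append(temp_X_LB)
--         X_dets_inds_RB_per_rd.append(temp_X_RB)
--
--
--         if rd == rds_eff-1:
--             break
--
--         for k in range(n_anc//2,n_anc):
--             Z_det_inds.append(k + n_anc*rd)
--
--     return X_det_inds,Z_det_inds,X_det_inds_LB,X_det_inds_RB,X_dets_inds_LB_per_rd,X_dets_inds_RB_per_rd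
-- ===== SOURCE B (Python) =====
-- def get_detector_inds_for_sc(d, rds):
--     # Single flat pass over all global detector indices: classify each index t
--     # by divmod(t, n_anc) into pre-allocated per-round buckets and the flat lists.
--     rds_eff = rds + 1
--     n_anc = d**2 - 1
--     q, h = n_anc // 4, n_anc // 2
--     nrounds = max(rds_eff, 0)
--     LB_per_rd = [[] for _ in range(nrounds)]
--     RB_per_rd = [[] for _ in range(nrounds)]
--     X_det_inds, Z_det_inds, X_det_inds_LB, X_det_inds_RB = [], [], [], []
--     for t in range(n_anc * nrounds):
--         rd, r = divmod(t, n_anc)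
--         if r < q:
--             X_det_inds.append(t)
--             X_det_inds_LB.append(t)
--             LB_per_rd[rd].append(t)
--         elif r < h:
--             X_det_inds.append(t)
--             X_det_inds_RB.append(t)
--             RB_per_rd[rd].append(t)
--         elif rd < rds_eff - 1:
--             Z_det_inds.append(t)
--     return (X_det_inds, Z_det_inds, X_det_inds_LB, X_det_inds_RB,
--             LB_per_rd, RB_per_rd)
-- ===== Notes on version B (the rewrite author's own statement) =====
-- stated objective: alternative
-- what changed: Replaces A's nested per-round loops (four inner append loops plus a break) with a single flat pass over all global indices range(n_anc*max(rds+1,0)) that classifies each index t by divmod(t, n_anc) into pre-allocated per-round buckets and the flat lists; Z's final-round break becomes the classification condition rd < rds_eff-1.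
import Mathlib
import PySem

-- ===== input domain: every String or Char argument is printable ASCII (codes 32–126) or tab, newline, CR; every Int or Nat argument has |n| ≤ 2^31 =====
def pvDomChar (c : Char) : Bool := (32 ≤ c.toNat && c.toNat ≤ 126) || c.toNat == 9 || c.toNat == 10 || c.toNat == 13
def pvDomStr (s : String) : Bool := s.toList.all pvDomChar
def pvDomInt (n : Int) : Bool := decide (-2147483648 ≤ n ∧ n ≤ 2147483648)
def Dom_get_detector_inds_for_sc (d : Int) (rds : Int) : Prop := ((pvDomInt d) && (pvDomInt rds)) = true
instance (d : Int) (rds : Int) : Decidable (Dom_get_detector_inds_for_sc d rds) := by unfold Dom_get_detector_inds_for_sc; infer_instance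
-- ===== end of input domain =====

-- B replaces A's nested per-round loops (four inner append loops and a break) by ONE flat
-- pass over all global indices 0..n_anc*rounds-1, classifying each index by divmod into
-- pre-allocated per-round buckets; objective: alternative decomposition, same cost.

-- ===== PORT A =====
-- literal transliteration of A: one loop over rounds carrying six accumulators,
-- inner append loops, the `break` rendered as `if rd = rds_eff-1` guarding the Z appends
-- (the condition holds only at the final iteration, so skipping = breaking).
def get_detector_inds_for_sc (d : Int) (rds : Int) :
    List Int × List Int × List Int × List Int × List (List Int) × List (List Int) :=
  let rds_eff := rds + 1
  let n_anc := d ^ 2 - 1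
  (PySem.List.pyRange 0 rds_eff 1).foldl
    (fun st rd =>
      let X := (PySem.List.pyRange 0 (PySem.Int.floordiv n_anc 2) 1).foldl
                 (fun acc k => acc ++ [k + n_anc * rd]) st.1
      let lb := (PySem.List.pyRange 0 (PySem.Int.floordiv n_anc 4) 1).foldl
                 (fun (p : List Int × List Int) k =>
                   (p.1 ++ [k + n_anc * rd], p.2 ++ [k + n_anc * rd]))
                 (st.2.2.1, [])
      let rb := (PySem.List.pyRange (PySem.Int.floordiv n_anc 4) (PySem.Int.floordiv n_anc 2) 1).foldl
                 (fun (p : List Int × List Int) k =>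
                   (p.1 ++ [k + n_anc * rd], p.2 ++ [k + n_anc * rd]))
                 (st.2.2.2.1, [])
      let LBp := st.2.2.2.2.1 ++ [lb.2]
      let RBp := st.2.2.2.2.2 ++ [rb.2]
      let Z := if rd = rds_eff - 1 then st.2.1
               else (PySem.List.pyRange (PySem.Int.floordiv n_anc 2) n_anc 1).foldl
                      (fun acc k => acc ++ [k + n_anc * rd]) st.2.1
      (X, Z, lb.1, rb.1, LBp, RBp))
    ([], [], [], [], [], [])

-- ===== PORT B =====
-- literal transliteration of Source B: one fold over range(n_anc*nrounds); `[[] for _ in range(nrounds)]`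
-- is List.replicate (nrounds ≥ 0); `LB_per_rd[rd].append(t)` is `.modify rd.toNat (· ++ [t])`,
-- exact because in the loop rd = t // n_anc ≥ 0 and rd < nrounds (t < n_anc*nrounds, n_anc > 0).
def get_detector_inds_for_sc_alt (d : Int) (rds : Int) :
    List Int × List Int × List Int × List Int × List (List Int) × List (List Int) :=
  let rds_eff := rds + 1
  let n_anc := d ^ 2 - 1
  let q := PySem.Int.floordiv n_anc 4
  let h := PySem.Int.floordiv n_anc 2
  let nrounds := max rds_eff 0
  (PySem.List.pyRange 0 (n_anc * nrounds) 1).foldl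
    (fun st t =>
      let rd := PySem.Int.floordiv t n_anc
      let r := PySem.Int.mod t n_anc
      if r < q then
        (st.1 ++ [t], st.2.1, st.2.2.1 ++ [t], st.2.2.2.1,
         st.2.2.2.2.1.modify rd.toNat (· ++ [t]), st.2.2.2.2.2)
      else if r < h then
        (st.1 ++ [t], st.2.1, st.2.2.1, st.2.2.2.1 ++ [t],
         st.2.2.2.2.1, st.2.2.2.2.2.modify rd.toNat (· ++ [t]))
      else if rd < rds_eff - 1 then
        (st.1, st.2.1 ++ [t], st.2.2.1, st.2.2.2.1, st.2.2.2.2.1, st.2.2.2.2.2)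
      else st)
    ([], [], [], [], List.replicate nrounds.toNat [], List.replicate nrounds.toNat [])

-- ===== PRECONDITION & SPEC =====
def Spec_get_detector_inds_for_sc (d : Int) (rds : Int) (out : List Int × List Int × List Int × List Int × List (List Int) × List (List Int)) : Prop := out = get_detector_inds_for_sc_alt d rds
-- instance synthesis stops at this tuple depth, so the DecidableEq chain is spelled out
def pvDecEqOut : DecidableEq (List Int × List Int × List Int × List Int × List (List Int) × List (List Int)) :=
  @instDecidableEqProd _ _ instDecidableEqList
   (@instDecidableEqProd _ _ instDecidableEqList
    (@instDecidableEqProd _ _ instDecidableEqList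
     (@instDecidableEqProd _ _ instDecidableEqList
      (@instDecidableEqProd _ _ instDecidableEqList instDecidableEqList))))
instance (d : Int) (rds : Int) (out : List Int × List Int × List Int × List Int × List (List Int) × List (List Int)) : Decidable (Spec_get_detector_inds_for_sc d rds out) := by unfold Spec_get_detector_inds_for_sc; exact pvDecEqOut out (get_detector_inds_for_sc_alt d rds)

-- ===== CLAIM (what is proved, stated in full; the proofs are below) =====
def Claim_equal_get_detector_inds_for_sc : Prop := ∀ (d : Int) (rds : Int), Dom_get_detector_inds_for_sc d rds → Spec_get_detector_inds_for_sc d rds (get_detector_inds_for_sc d rds)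

-- ===== LEMMAS AND PROOFS =====

-- the common closed form both ports are reduced to
def pvClosed (n q h m : Int) :
    List Int × List Int × List Int × List Int × List (List Int) × List (List Int) :=
  ((PySem.List.pyRange 0 m 1).flatMap (fun rd => PySem.List.pyRange (n*rd) (n*rd+h) 1),
   (PySem.List.pyRange 0 (m-1) 1).flatMap (fun rd => PySem.List.pyRange (n*rd+h) (n*(rd+1)) 1),
   (PySem.List.pyRange 0 m 1).flatMap (fun rd => PySem.List.pyRange (n*rd) (n*rd+q) 1),
   (PySem.List.pyRange 0 m 1).flatMap (fun rd => PySem.List.pyRange (n*rd+q) (n*rd+h) 1),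
   (PySem.List.pyRange 0 m 1).map (fun rd => PySem.List.pyRange (n*rd) (n*rd+q) 1),
   (PySem.List.pyRange 0 m 1).map (fun rd => PySem.List.pyRange (n*rd+q) (n*rd+h) 1))

-- ---------- A-side ----------

theorem foldl_append_add (a b c : Int) (init : List Int) :
    (PySem.List.pyRange a b 1).foldl (fun acc k => acc ++ [k + c]) init
      = init ++ PySem.List.pyRange (a + c) (b + c) 1 := by
  rw [PySem.List.foldl_append_singleton_eq_map]
  congr 1
  simp only [PySem.List.pyRange_one, List.map_map]
  have : b + c - (a + c) = b - a := by ring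
  rw [this]
  exact List.map_congr_left (fun k _ => by simp [Function.comp]; ring)

def pvStepFull (n q h : Int)
    (st : List Int × List Int × List Int × List Int × List (List Int) × List (List Int))
    (rd : Int) :
    List Int × List Int × List Int × List Int × List (List Int) × List (List Int) :=
  (st.1 ++ PySem.List.pyRange (n * rd) (n * rd + h) 1,
   st.2.1 ++ PySem.List.pyRange (n * rd + h) (n * (rd + 1)) 1,
   st.2.2.1 ++ PySem.List.pyRange (n * rd) (n * rd + q) 1,
   st.2.2.2.1 ++ PySem.List.pyRange (n * rd + q) (n * rd + h) 1,
   st.2.2.2.2.1 ++ [PySem.List.pyRange (n * rd) (n * rd + q) 1],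
   st.2.2.2.2.2 ++ [PySem.List.pyRange (n * rd + q) (n * rd + h) 1])

def pvStepNoZ (n q h : Int)
    (st : List Int × List Int × List Int × List Int × List (List Int) × List (List Int))
    (rd : Int) :
    List Int × List Int × List Int × List Int × List (List Int) × List (List Int) :=
  (st.1 ++ PySem.List.pyRange (n * rd) (n * rd + h) 1,
   st.2.1,
   st.2.2.1 ++ PySem.List.pyRange (n * rd) (n * rd + q) 1,
   st.2.2.2.1 ++ PySem.List.pyRange (n * rd + q) (n * rd + h) 1,
   st.2.2.2.2.1 ++ [PySem.List.pyRange (n * rd) (n * rd + q) 1],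
   st.2.2.2.2.2 ++ [PySem.List.pyRange (n * rd + q) (n * rd + h) 1])

theorem bodyA_eq (n m : Int)
    (st : List Int × List Int × List Int × List Int × List (List Int) × List (List Int))
    (rd : Int) :
    (let X := (PySem.List.pyRange 0 (PySem.Int.floordiv n 2) 1).foldl
                 (fun acc k => acc ++ [k + n * rd]) st.1
     let lb := (PySem.List.pyRange 0 (PySem.Int.floordiv n 4) 1).foldl
                 (fun (p : List Int × List Int) k =>
                   (p.1 ++ [k + n * rd], p.2 ++ [k + n * rd]))
                 (st.2.2.1, [])
     let rb := (PySem.List.pyRange (PySem.Int.floordiv n 4) (PySem.Int.floordiv n 2) 1).foldl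
                 (fun (p : List Int × List Int) k =>
                   (p.1 ++ [k + n * rd], p.2 ++ [k + n * rd]))
                 (st.2.2.2.1, [])
     let LBp := st.2.2.2.2.1 ++ [lb.2]
     let RBp := st.2.2.2.2.2 ++ [rb.2]
     let Z := if rd = m - 1 then st.2.1
              else (PySem.List.pyRange (PySem.Int.floordiv n 2) n 1).foldl
                     (fun acc k => acc ++ [k + n * rd]) st.2.1
     ((X, Z, lb.1, rb.1, LBp, RBp) :
       List Int × List Int × List Int × List Int × List (List Int) × List (List Int)))
    = if rd = m - 1 then pvStepNoZ n (PySem.Int.floordiv n 4) (PySem.Int.floordiv n 2) st rd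
      else pvStepFull n (PySem.Int.floordiv n 4) (PySem.Int.floordiv n 2) st rd := by
  set q := PySem.Int.floordiv n 4
  set h := PySem.Int.floordiv n 2
  rw [PySem.List.foldl_prod_mk (f := fun acc k => acc ++ [k + n * rd])
        (g := fun acc k => acc ++ [k + n * rd]),
      PySem.List.foldl_prod_mk (f := fun acc k => acc ++ [k + n * rd])
        (g := fun acc k => acc ++ [k + n * rd])]
  simp only [foldl_append_add, List.nil_append, pvStepNoZ, pvStepFull]
  by_cases hc : rd = m - 1 <;>
    simp [hc, zero_add, add_comm, mul_add, mul_one]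

theorem foldl_stepFull (n q h : Int) (j : Nat) :
    (PySem.List.pyRange 0 (j : Int) 1).foldl (pvStepFull n q h) ([], [], [], [], [], [])
      = ((PySem.List.pyRange 0 (j : Int) 1).flatMap
           (fun rd => PySem.List.pyRange (n * rd) (n * rd + h) 1),
         (PySem.List.pyRange 0 (j : Int) 1).flatMap
           (fun rd => PySem.List.pyRange (n * rd + h) (n * (rd + 1)) 1),
         (PySem.List.pyRange 0 (j : Int) 1).flatMap
           (fun rd => PySem.List.pyRange (n * rd) (n * rd + q) 1),
         (PySem.List.pyRange 0 (j : Int) 1).flatMap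
           (fun rd => PySem.List.pyRange (n * rd + q) (n * rd + h) 1),
         (PySem.List.pyRange 0 (j : Int) 1).map
           (fun rd => PySem.List.pyRange (n * rd) (n * rd + q) 1),
         (PySem.List.pyRange 0 (j : Int) 1).map
           (fun rd => PySem.List.pyRange (n * rd + q) (n * rd + h) 1)) := by
  induction j with
  | zero => simp [PySem.List.pyRange_one_eq_nil]
  | succ j ih =>
    have hcast : ((j + 1 : Nat) : Int) = (j : Int) + 1 := by push_cast; ring
    rw [hcast, PySem.List.pyRange_one_succ_right (by positivity), List.foldl_append,
        ih]
    simp [pvStepFull, List.flatMap_append, List.map_append]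

theorem A_eq_closed (d rds : Int) :
    get_detector_inds_for_sc d rds
      = pvClosed (d ^ 2 - 1) (PySem.Int.floordiv (d ^ 2 - 1) 4)
          (PySem.Int.floordiv (d ^ 2 - 1) 2) (rds + 1) := by
  unfold get_detector_inds_for_sc pvClosed
  set n := d ^ 2 - 1 with hn
  set m := rds + 1 with hm
  simp only [bodyA_eq n m]
  by_cases hpos : m ≤ 0
  · rw [PySem.List.pyRange_one_eq_nil hpos, PySem.List.pyRange_one_eq_nil (by omega)]
    simp
  · rw [not_le] at hpos
    have ht : (0 : Int) ≤ m - 1 := by omega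
    have hsplit : PySem.List.pyRange 0 m 1
        = PySem.List.pyRange 0 (m - 1) 1 ++ [m - 1] := by
      have := PySem.List.pyRange_one_succ_right (a := 0) (b := m - 1) ht
      simpa using this
    rw [hsplit, List.foldl_append]
    have hcongr : (PySem.List.pyRange 0 (m - 1) 1).foldl
        (fun st rd => if rd = m - 1 then pvStepNoZ n (PySem.Int.floordiv n 4) (PySem.Int.floordiv n 2) st rd
                      else pvStepFull n (PySem.Int.floordiv n 4) (PySem.Int.floordiv n 2) st rd)
        ([], [], [], [], [], [])
        = (PySem.List.pyRange 0 (m - 1) 1).foldl (pvStepFull n (PySem.Int.floordiv n 4) (PySem.Int.floordiv n 2))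
        ([], [], [], [], [], []) := by
      apply PySem.List.foldl_congr_mem
      intro acc x hx
      have hxlt : x < m - 1 := (PySem.List.mem_pyRange_one.mp hx).2
      simp [show x ≠ m - 1 by omega]
    rw [hcongr]
    have hnat : ((m - 1).toNat : Int) = m - 1 := Int.toNat_of_nonneg ht
    rw [← hnat, foldl_stepFull n (PySem.Int.floordiv n 4) (PySem.Int.floordiv n 2) (m - 1).toNat, hnat]
    simp only [List.foldl_cons, List.foldl_nil]
    simp only [if_true]
    simp [pvStepNoZ, List.map_append, List.flatMap_def]

-- ---------- B-side ----------

-- B's loop body, named (definitionally equal to the lambda in the port)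
def pvBodyB (n q h m : Int)
    (st : List Int × List Int × List Int × List Int × List (List Int) × List (List Int))
    (t : Int) :
    List Int × List Int × List Int × List Int × List (List Int) × List (List Int) :=
  let rd := PySem.Int.floordiv t n
  let r := PySem.Int.mod t n
  if r < q then
    (st.1 ++ [t], st.2.1, st.2.2.1 ++ [t], st.2.2.2.1,
     st.2.2.2.2.1.modify rd.toNat (· ++ [t]), st.2.2.2.2.2)
  else if r < h then
    (st.1 ++ [t], st.2.1, st.2.2.1, st.2.2.2.1 ++ [t],
     st.2.2.2.2.1, st.2.2.2.2.2.modify rd.toNat (· ++ [t]))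
  else if rd < m - 1 then
    (st.1, st.2.1 ++ [t], st.2.2.1, st.2.2.2.1, st.2.2.2.2.1, st.2.2.2.2.2)
  else st

theorem alt_eq_fold (d rds : Int) :
    get_detector_inds_for_sc_alt d rds
      = (PySem.List.pyRange 0 ((d ^ 2 - 1) * max (rds + 1) 0) 1).foldl
          (pvBodyB (d ^ 2 - 1) (PySem.Int.floordiv (d ^ 2 - 1) 4)
            (PySem.Int.floordiv (d ^ 2 - 1) 2) (rds + 1))
          ([], [], [], [], List.replicate (max (rds + 1) 0).toNat [],
           List.replicate (max (rds + 1) 0).toNat []) := rfl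

theorem modify_id' (l : List (List Int)) (i : Nat) :
    (l.modify i fun x => x) = l := List.modify_id i l

theorem modify_modify (l : List (List Int)) (i : Nat) (xs ys : List Int) :
    (l.modify i (· ++ xs)).modify i (· ++ ys) = l.modify i (· ++ (xs ++ ys)) := by
  rw [List.modify_modify_eq]
  congr 1
  funext x
  simp [Function.comp]

theorem modify_append_cons (A : List (List Int)) (x : List Int) (B : List (List Int))
    (f : List Int → List Int) :
    (A ++ x :: B).modify A.length f = A ++ f x :: B := by
  simp [List.modify_eq_set_getElem?]

theorem modify_at_len (A : List (List Int)) (x : List Int) (B : List (List Int))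
    (f : List Int → List Int) (N : Nat) (hN : A.length = N) :
    (A ++ x :: B).modify N f = A ++ f x :: B := by
  subst hN; exact modify_append_cons A x B f

-- fold of the three branch-specific steps
theorem foldl_b1 (i : Nat) (xs : List Int)
    (st : List Int × List Int × List Int × List Int × List (List Int) × List (List Int)) :
    xs.foldl (fun st t => (st.1 ++ [t], st.2.1, st.2.2.1 ++ [t], st.2.2.2.1,
        st.2.2.2.2.1.modify i (· ++ [t]), st.2.2.2.2.2)) st
      = (st.1 ++ xs, st.2.1, st.2.2.1 ++ xs, st.2.2.2.1,
         st.2.2.2.2.1.modify i (· ++ xs), st.2.2.2.2.2) := by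
  induction xs generalizing st with
  | nil => simp [modify_id']
  | cons x xs ih => simp [ih, modify_modify]

theorem foldl_b2 (i : Nat) (xs : List Int)
    (st : List Int × List Int × List Int × List Int × List (List Int) × List (List Int)) :
    xs.foldl (fun st t => (st.1 ++ [t], st.2.1, st.2.2.1, st.2.2.2.1 ++ [t],
        st.2.2.2.2.1, st.2.2.2.2.2.modify i (· ++ [t]))) st
      = (st.1 ++ xs, st.2.1, st.2.2.1, st.2.2.2.1 ++ xs,
         st.2.2.2.2.1, st.2.2.2.2.2.modify i (· ++ xs)) := by
  induction xs generalizing st with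
  | nil => simp [modify_id']
  | cons x xs ih => simp [ih, modify_modify]

theorem foldl_bz (xs : List Int)
    (st : List Int × List Int × List Int × List Int × List (List Int) × List (List Int)) :
    xs.foldl (fun st t => (st.1, st.2.1 ++ [t], st.2.2.1, st.2.2.2.1,
        st.2.2.2.2.1, st.2.2.2.2.2)) st
      = (st.1, st.2.1 ++ xs, st.2.2.1, st.2.2.2.1, st.2.2.2.2.1, st.2.2.2.2.2) := by
  induction xs generalizing st with
  | nil => simp
  | cons x xs ih => simp [ih]

theorem foldl_id (xs : List Int)
    (st : List Int × List Int × List Int × List Int × List (List Int) × List (List Int)) :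
    xs.foldl (fun st _ => st) st = st := by
  induction xs with
  | nil => rfl
  | cons x xs ih => simp [ih]

theorem divmod_block (n rd t : Int) (hn : 0 < n) (h1 : n * rd ≤ t) (h2 : t < n * (rd + 1)) :
    PySem.Int.floordiv t n = rd ∧ PySem.Int.mod t n = t - n * rd := by
  have hd : PySem.Int.floordiv t n = rd := by
    rw [PySem.Int.floordiv_eq_iff_of_pos hn]
    constructor <;> nlinarith
  refine ⟨hd, ?_⟩
  have := PySem.Int.floordiv_mul_add_mod t n
  rw [hd] at this
  linarith

-- one full round block of B's flat loop
theorem blockB (n q h m rd : Int) (hn : 0 < n) (hq : 0 ≤ q) (hqh : q ≤ h) (hhn : h ≤ n)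
    (hrd : 0 ≤ rd)
    (st : List Int × List Int × List Int × List Int × List (List Int) × List (List Int)) :
    (PySem.List.pyRange (n * rd) (n * (rd + 1)) 1).foldl (pvBodyB n q h m) st
      = (st.1 ++ PySem.List.pyRange (n * rd) (n * rd + h) 1,
         st.2.1 ++ (if rd < m - 1 then PySem.List.pyRange (n * rd + h) (n * (rd + 1)) 1 else []),
         st.2.2.1 ++ PySem.List.pyRange (n * rd) (n * rd + q) 1,
         st.2.2.2.1 ++ PySem.List.pyRange (n * rd + q) (n * rd + h) 1,
         st.2.2.2.2.1.modify rd.toNat (· ++ PySem.List.pyRange (n * rd) (n * rd + q) 1),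
         st.2.2.2.2.2.modify rd.toNat (· ++ PySem.List.pyRange (n * rd + q) (n * rd + h) 1)) := by
  have hsplit1 : PySem.List.pyRange (n * rd) (n * (rd + 1)) 1
      = PySem.List.pyRange (n * rd) (n * rd + q) 1
        ++ PySem.List.pyRange (n * rd + q) (n * (rd + 1)) 1 :=
    PySem.List.pyRange_one_append _ _ _ (by linarith) (by nlinarith)
  have hsplit2 : PySem.List.pyRange (n * rd + q) (n * (rd + 1)) 1
      = PySem.List.pyRange (n * rd + q) (n * rd + h) 1
        ++ PySem.List.pyRange (n * rd + h) (n * (rd + 1)) 1 :=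
    PySem.List.pyRange_one_append _ _ _ (by linarith) (by nlinarith)
  rw [hsplit1, List.foldl_append, hsplit2, List.foldl_append]
  have hc1 : ∀ (st' : List Int × List Int × List Int × List Int × List (List Int) × List (List Int)),
      (PySem.List.pyRange (n * rd) (n * rd + q) 1).foldl (pvBodyB n q h m) st'
        = (st'.1 ++ PySem.List.pyRange (n * rd) (n * rd + q) 1, st'.2.1,
           st'.2.2.1 ++ PySem.List.pyRange (n * rd) (n * rd + q) 1, st'.2.2.2.1,
           st'.2.2.2.2.1.modify rd.toNat (· ++ PySem.List.pyRange (n * rd) (n * rd + q) 1),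
           st'.2.2.2.2.2) := by
    intro st'
    rw [PySem.List.foldl_congr_mem (g := fun st t => (st.1 ++ [t], st.2.1, st.2.2.1 ++ [t],
        st.2.2.2.1, st.2.2.2.2.1.modify rd.toNat (· ++ [t]), st.2.2.2.2.2))]
    · exact foldl_b1 rd.toNat _ st'
    · intro acc t ht
      obtain ⟨ht1, ht2⟩ := PySem.List.mem_pyRange_one.mp ht
      obtain ⟨hd, hm'⟩ := divmod_block n rd t hn ht1 (by nlinarith)
      simp [pvBodyB, hd, hm', show t - n * rd < q by omega]
  have hc2 : ∀ (st' : List Int × List Int × List Int × List Int × List (List Int) × List (List Int)),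
      (PySem.List.pyRange (n * rd + q) (n * rd + h) 1).foldl (pvBodyB n q h m) st'
        = (st'.1 ++ PySem.List.pyRange (n * rd + q) (n * rd + h) 1, st'.2.1, st'.2.2.1,
           st'.2.2.2.1 ++ PySem.List.pyRange (n * rd + q) (n * rd + h) 1,
           st'.2.2.2.2.1,
           st'.2.2.2.2.2.modify rd.toNat (· ++ PySem.List.pyRange (n * rd + q) (n * rd + h) 1)) := by
    intro st'
    rw [PySem.List.foldl_congr_mem (g := fun st t => (st.1 ++ [t], st.2.1, st.2.2.1,
        st.2.2.2.1 ++ [t], st.2.2.2.2.1, st.2.2.2.2.2.modify rd.toNat (· ++ [t])))]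
    · exact foldl_b2 rd.toNat _ st'
    · intro acc t ht
      obtain ⟨ht1, ht2⟩ := PySem.List.mem_pyRange_one.mp ht
      obtain ⟨hd, hm'⟩ := divmod_block n rd t hn (by omega) (by nlinarith)
      simp [pvBodyB, hd, hm', show ¬ t - n * rd < q by omega, show t - n * rd < h by omega]
  have hc3 : ∀ (st' : List Int × List Int × List Int × List Int × List (List Int) × List (List Int)),
      (PySem.List.pyRange (n * rd + h) (n * (rd + 1)) 1).foldl (pvBodyB n q h m) st'
        = (st'.1, st'.2.1 ++ (if rd < m - 1 then PySem.List.pyRange (n * rd + h) (n * (rd + 1)) 1 else []),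
           st'.2.2.1, st'.2.2.2.1, st'.2.2.2.2.1, st'.2.2.2.2.2) := by
    intro st'
    by_cases hz : rd < m - 1
    · rw [PySem.List.foldl_congr_mem (g := fun st t => (st.1, st.2.1 ++ [t], st.2.2.1,
          st.2.2.2.1, st.2.2.2.2.1, st.2.2.2.2.2))]
      · rw [foldl_bz]; simp [hz]
      · intro acc t ht
        obtain ⟨ht1, ht2⟩ := PySem.List.mem_pyRange_one.mp ht
        obtain ⟨hd, hm'⟩ := divmod_block n rd t hn (by omega) ht2
        simp [pvBodyB, hd, hm', show ¬ t - n * rd < q by omega,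
              show ¬ t - n * rd < h by omega, hz]
    · rw [PySem.List.foldl_congr_mem (g := fun st _ => st)]
      · rw [foldl_id]; simp [hz]
      · intro acc t ht
        obtain ⟨ht1, ht2⟩ := PySem.List.mem_pyRange_one.mp ht
        obtain ⟨hd, hm'⟩ := divmod_block n rd t hn (by omega) ht2
        simp [pvBodyB, hd, hm', show ¬ t - n * rd < q by omega,
              show ¬ t - n * rd < h by omega, hz]
  rw [hc1, hc2, hc3]
  simp only [List.append_assoc, modify_modify]
  rw [← PySem.List.pyRange_one_append (n * rd) (n * rd + q) (n * rd + h) (by linarith) (by linarith)]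

-- folding B's body over N full rounds, buckets pre-allocated to length K ≥ N
theorem foldB (n q h m : Int) (hn : 0 < n) (hq : 0 ≤ q) (hqh : q ≤ h) (hhn : h ≤ n)
    (N K : Nat) (hNK : N ≤ K) :
    (PySem.List.pyRange 0 (n * (N : Int)) 1).foldl (pvBodyB n q h m)
        ([], [], [], [], List.replicate K [], List.replicate K [])
      = ((PySem.List.pyRange 0 (N : Int) 1).flatMap
           (fun rd => PySem.List.pyRange (n * rd) (n * rd + h) 1),
         (PySem.List.pyRange 0 (N : Int) 1).flatMap
           (fun rd => if rd < m - 1 then PySem.List.pyRange (n * rd + h) (n * (rd + 1)) 1 else []),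
         (PySem.List.pyRange 0 (N : Int) 1).flatMap
           (fun rd => PySem.List.pyRange (n * rd) (n * rd + q) 1),
         (PySem.List.pyRange 0 (N : Int) 1).flatMap
           (fun rd => PySem.List.pyRange (n * rd + q) (n * rd + h) 1),
         (PySem.List.pyRange 0 (N : Int) 1).map
           (fun rd => PySem.List.pyRange (n * rd) (n * rd + q) 1) ++ List.replicate (K - N) [],
         (PySem.List.pyRange 0 (N : Int) 1).map
           (fun rd => PySem.List.pyRange (n * rd + q) (n * rd + h) 1) ++ List.replicate (K - N) []) := by
  induction N with
  | zero => simp [PySem.List.pyRange_one_eq_nil]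
  | succ N ih =>
    have hcast : ((N + 1 : Nat) : Int) = (N : Int) + 1 := by push_cast; ring
    have hNK' : N ≤ K := Nat.le_of_succ_le hNK
    have hsplit : PySem.List.pyRange 0 (n * ((N + 1 : Nat) : Int)) 1
        = PySem.List.pyRange 0 (n * (N : Int)) 1
          ++ PySem.List.pyRange (n * (N : Int)) (n * ((N : Int) + 1)) 1 := by
      rw [hcast]
      exact PySem.List.pyRange_one_append _ _ _ (by positivity) (by nlinarith)
    rw [hsplit, List.foldl_append, ih hNK',
        blockB n q h m (N : Int) hn hq hqh hhn (by positivity)]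
    have hlen1 : ((PySem.List.pyRange 0 (N : Int) 1).map
        (fun rd => PySem.List.pyRange (n * rd) (n * rd + q) 1)).length = N := by
      simp [PySem.List.length_pyRange_one]
    have hlen2 : ((PySem.List.pyRange 0 (N : Int) 1).map
        (fun rd => PySem.List.pyRange (n * rd + q) (n * rd + h) 1)).length = N := by
      simp [PySem.List.length_pyRange_one]
    have hrepl : List.replicate (K - N) ([] : List Int)
        = [] :: List.replicate (K - (N + 1)) [] := by
      have : K - N = (K - (N + 1)) + 1 := by omega
      rw [this, List.replicate_succ]
    have htN : ((N : Int)).toNat = N := by simp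
    have hsucc : PySem.List.pyRange 0 ((N : Int) + 1) 1
        = PySem.List.pyRange 0 (N : Int) 1 ++ [(N : Int)] :=
      PySem.List.pyRange_one_succ_right (by positivity)
    rw [hcast, hsucc]
    simp only [List.flatMap_append, List.map_append, List.flatMap_cons, List.flatMap_nil,
      List.append_nil, List.map_cons, List.map_nil]
    refine congrArg₂ _ rfl (congrArg₂ _ rfl (congrArg₂ _ rfl (congrArg₂ _ rfl ?_)))
    rw [Prod.mk.injEq]
    constructor
    · rw [hrepl, htN, modify_at_len _ _ _ _ _ hlen1]
      simp
    · rw [hrepl, htN, modify_at_len _ _ _ _ _ hlen2]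
      simp

theorem flatMap_if_z (m : Int) (f : Int → List Int) :
    (PySem.List.pyRange 0 (max m 0) 1).flatMap (fun rd => if rd < m - 1 then f rd else [])
      = (PySem.List.pyRange 0 (m - 1) 1).flatMap f := by
  by_cases hm : m ≤ 0
  · rw [PySem.List.pyRange_one_eq_nil (by omega), PySem.List.pyRange_one_eq_nil (by omega)]
    simp
  · rw [not_le] at hm
    have hmax : max m 0 = m := by omega
    have hsplit : PySem.List.pyRange 0 m 1
        = PySem.List.pyRange 0 (m - 1) 1 ++ [m - 1] := by
      have := PySem.List.pyRange_one_succ_right (a := 0) (b := m - 1) (by omega)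
      simpa using this
    rw [hmax, hsplit, List.flatMap_append]
    simp only [List.flatMap_cons, List.flatMap_nil, List.append_nil]
    rw [if_neg (by omega), List.append_nil]
    rw [List.flatMap_def, List.flatMap_def,
        List.map_congr_left
          (fun rd hrd => if_pos (PySem.List.mem_pyRange_one.mp hrd).2)]

theorem B_eq_closed (d rds : Int) :
    get_detector_inds_for_sc_alt d rds
      = pvClosed (d ^ 2 - 1) (PySem.Int.floordiv (d ^ 2 - 1) 4)
          (PySem.Int.floordiv (d ^ 2 - 1) 2) (rds + 1) := by
  rw [alt_eq_fold]
  set n := d ^ 2 - 1 with hn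
  set m := rds + 1 with hm
  set q := PySem.Int.floordiv n 4 with hq4
  set h := PySem.Int.floordiv n 2 with hh2
  have hqe : q = n / 4 := PySem.Int.floordiv_eq_ediv_of_pos (by norm_num)
  have hhe : h = n / 2 := PySem.Int.floordiv_eq_ediv_of_pos (by norm_num)
  have hmx : (0 : Int) ≤ max m 0 := le_max_right _ _
  by_cases hnp : 0 < n
  · have hq : 0 ≤ q := by rw [hqe]; omega
    have hqh : q ≤ h := by rw [hqe, hhe]; omega
    have hhn : h ≤ n := by rw [hhe]; omega
    have hNc : (((max m 0).toNat : Int)) = max m 0 := Int.toNat_of_nonneg hmx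
    rw [show n * max m 0 = n * (((max m 0).toNat : Nat) : Int) by rw [hNc]]
    rw [foldB n q h m hnp hq hqh hhn (max m 0).toNat (max m 0).toNat le_rfl]
    have hrange : PySem.List.pyRange 0 (((max m 0).toNat : Int)) 1
        = PySem.List.pyRange 0 m 1 := by
      rw [hNc]
      by_cases h0 : m ≤ 0
      · rw [PySem.List.pyRange_one_eq_nil (by omega), PySem.List.pyRange_one_eq_nil h0]
      · rw [show max m 0 = m by omega]
    have hpm : PySem.List.pyRange 0 (max m 0) 1 = PySem.List.pyRange 0 m 1 := by
      by_cases h0 : m ≤ 0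
      · rw [PySem.List.pyRange_one_eq_nil (by omega), PySem.List.pyRange_one_eq_nil h0]
      · rw [show max m 0 = m by omega]
    have hz := flatMap_if_z m (fun rd => PySem.List.pyRange (n * rd + h) (n * (rd + 1)) 1)
    rw [hpm] at hz
    unfold pvClosed
    rw [hrange, hz, Nat.sub_self]
    simp
  · push_neg at hnp
    have hq : q ≤ 0 := by rw [hqe]; omega
    have hh : h ≤ 0 := by rw [hhe]; omega
    have hnh : n ≤ h := by rw [hhe]; omega
    have hqh : h ≤ q := by rw [hqe, hhe]; omega
    rw [PySem.List.pyRange_one_eq_nil (mul_nonpos_of_nonpos_of_nonneg hnp hmx)]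
    simp only [List.foldl_nil]
    unfold pvClosed
    have e1 : ∀ rd : Int, PySem.List.pyRange (n * rd) (n * rd + h) 1 = [] :=
      fun rd => PySem.List.pyRange_one_eq_nil (by linarith)
    have e2 : ∀ rd : Int, PySem.List.pyRange (n * rd + h) (n * (rd + 1)) 1 = [] :=
      fun rd => PySem.List.pyRange_one_eq_nil (by nlinarith)
    have e3 : ∀ rd : Int, PySem.List.pyRange (n * rd) (n * rd + q) 1 = [] :=
      fun rd => PySem.List.pyRange_one_eq_nil (by linarith)
    have e4 : ∀ rd : Int, PySem.List.pyRange (n * rd + q) (n * rd + h) 1 = [] :=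
      fun rd => PySem.List.pyRange_one_eq_nil (by linarith)
    rw [List.flatMap_def, List.map_congr_left (fun rd _ => e1 rd),
        List.flatMap_def, List.map_congr_left (fun rd _ => e2 rd),
        List.flatMap_def, List.map_congr_left (fun rd _ => e3 rd),
        List.flatMap_def, List.map_congr_left (fun rd _ => e4 rd)]
    have hlen : (PySem.List.pyRange 0 m 1).length = (max m 0).toNat := by
      rw [PySem.List.length_pyRange_one]; omega
    rw [List.map_const', List.map_const', hlen]
    simp

-- ===== VERDICT (by name: the statement is the Claim_ definition above) =====
theorem get_detector_inds_for_sc_spec : Claim_equal_get_detector_inds_for_sc := by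
  intro d rds _
  unfold Spec_get_detector_inds_for_sc
  rw [A_eq_closed, B_eq_closed]
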